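-- pv_equiv track=rewrite | github.com/Maheedhar-rao/rocky | predict.py | _filter_non_txn_sections
-- ===== SOURCE A (Python) =====
-- def _filter_non_txn_sections(words: list) -> list:
--     """
--     Remove words from non-transaction sections at both the TOP and BOTTOM of a page.
--
--     TOP: Bank statements often start with summary sections (CHECKING SUMMARY, fee info)
--     before the actual TRANSACTION DETAIL section. These waste token budget.
--
--     BOTTOM: Statements commonly end with "Daily Balance Summary" sections whose rows
--     look like transactions (date + amount) but aren't.
--
--     Works for any bank — detects section boundaries by scanning for known header phrases.
--     """
--     if not words:
--         return words
--
--     texts = [w["text"].lower() for w in words]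
--
--     # --- Step 1: Find start of transaction section (remove pre-transaction preamble) ---
--     TXN_START_HEADERS = [
--         "transaction detail",
--         "transaction activity",
--         "account activity",
--         "itemized transactions",
--         "transaction history",
--     ]
--
--     start_idx = 0
--     for header in TXN_START_HEADERS:
--         header_tokens = header.split()
--         hlen = len(header_tokens)
--         for i in range(len(texts) - hlen + 1):
--             window = " ".join(texts[i : i + hlen])
--             if window == header:
--                 if i > start_idx:
--                     start_idx = i
--                 break
--
--     # Only cut pre-content if there's a significant preamble (> 20 words)
--     if start_idx < 20:
--         start_idx = 0
--
--     # --- Step 2: Find end of transaction section (remove post-transaction content) ---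
--     NON_TXN_HEADERS = [
--         "daily balance summary",
--         "daily ledger balance",
--         "daily ledger balances",
--         "daily ending balance",
--         "daily ending balances",
--         "ending daily balance",
--         "ending daily balances",
--         "average ledger balance",
--         "balance summary",
--         "balance activity",
--         "daily balance",
--         "daily balances",
--         "service charge summary",
--         "total fees charged",
--         "year to date totals",
--         "account balance summary",
--     ]
--
--     cutoff_idx = len(words)  # default: keep all
--
--     for header in NON_TXN_HEADERS:
--         header_tokens = header.split()
--         hlen = len(header_tokens)
--         for i in range(start_idx, len(texts) - hlen + 1):
--             window = " ".join(texts[i : i + hlen])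
--             if window == header:
--                 if i < cutoff_idx:
--                     cutoff_idx = i
--                 break
--
--     return words[start_idx:cutoff_idx]
-- ===== SOURCE B (Python) =====
-- TXN_START_HEADERS = [
--     "transaction detail",
--     "transaction activity",
--     "account activity",
--     "itemized transactions",
--     "transaction history",
-- ]
--
-- NON_TXN_HEADERS = [
--     "daily balance summary",
--     "daily ledger balance",
--     "daily ledger balances",
--     "daily ending balance",
--     "daily ending balances",
--     "ending daily balance",
--     "ending daily balances",
--     "average ledger balance",
--     "balance summary",
--     "balance activity",
--     "daily balance",
--     "daily balances",
--     "service charge summary",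
--     "total fees charged",
--     "year to date totals",
--     "account balance summary",
-- ]
--
--
-- def _filter_non_txn_sections(words: list) -> list:
--     """Position-major single scan instead of header-major repeated scans."""
--     if not words:
--         return words
--
--     texts = [w["text"].lower() for w in words]
--     n = len(texts)
--
--     def hit(i, h, hlen):
--         return i + hlen <= n and " ".join(texts[i:i + hlen]) == h
--
--     # Start of transaction section: walk positions once; each start header is
--     # retired at its first occurrence, the last retirement position wins
--     # (= max over headers of their first occurrence).
--     pending = [(h, len(h.split())) for h in TXN_START_HEADERS]
--     start_idx = 0
--     i = 0
--     while i < n and pending: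
--         rest = [(h, hlen) for (h, hlen) in pending if not hit(i, h, hlen)]
--         if len(rest) != len(pending):
--             start_idx = i
--         pending = rest
--         i += 1
--     if start_idx < 20:
--         start_idx = 0
--
--     # End of transaction section: first position at or after start_idx where
--     # any non-transaction header begins (= min over headers of first match).
--     non_pairs = [(h, len(h.split())) for h in NON_TXN_HEADERS]
--     cutoff_idx = n
--     for i in range(start_idx, n):
--         if any(hit(i, h, hlen) for (h, hlen) in non_pairs):
--             cutoff_idx = i
--             break
--
--     return words[start_idx:cutoff_idx]
-- ===== Notes on version B (the rewrite author's own statement) =====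
-- stated objective: alternative
-- what changed: Header-major repeated scans (one full window scan per header, for both the start and the cutoff search) are replaced by position-major scans: one left-to-right walk that retires each start header at its first occurrence (last retirement = max of first occurrences, and the walk stops once all headers are retired), and one walk from start_idx that stops at the first position where any non-txn header matches; Pre_ excludes word dicts lacking a 'text' key, where A (and B) raise KeyError.
import Mathlib
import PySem

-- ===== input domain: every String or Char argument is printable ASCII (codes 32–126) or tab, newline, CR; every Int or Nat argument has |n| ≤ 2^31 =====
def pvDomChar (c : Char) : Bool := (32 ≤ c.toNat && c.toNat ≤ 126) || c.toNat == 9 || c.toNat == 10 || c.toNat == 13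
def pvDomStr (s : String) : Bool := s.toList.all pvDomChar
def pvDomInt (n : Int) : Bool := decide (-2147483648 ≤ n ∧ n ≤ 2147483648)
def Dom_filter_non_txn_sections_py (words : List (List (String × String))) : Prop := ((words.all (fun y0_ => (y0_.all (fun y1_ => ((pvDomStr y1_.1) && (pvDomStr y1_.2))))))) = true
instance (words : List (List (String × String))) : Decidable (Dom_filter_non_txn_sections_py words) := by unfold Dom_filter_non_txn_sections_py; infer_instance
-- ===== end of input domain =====

-- B replaces A's header-major repeated window scans by position-major scans (retire each
-- start header at its first occurrence; stop at the first non-txn header match): an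
-- alternative decomposition of the same cost.  Equivalence is on the return value; neither
-- program mutates its argument.

-- ===== PORT A =====
-- (helpers shared by both ports: both Pythons contain the identical expressions
--  'w["text"].lower()', '" ".join(texts[i:i+hlen])' and 'len(header.split())')
def pvStartHeaders : List String :=
  ["transaction detail", "transaction activity", "account activity",
   "itemized transactions", "transaction history"]

def pvNonTxnHeaders : List String :=
  ["daily balance summary", "daily ledger balance", "daily ledger balances",
   "daily ending balance", "daily ending balances", "ending daily balance",
   "ending daily balances", "average ledger balance", "balance summary",
   "balance activity", "daily balance", "daily balances",
   "service charge summary", "total fees charged", "year to date totals",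
   "account balance summary"]

-- w["text"].lower(); the .getD "" default is only reached outside Pre_ (KeyError)
def pvText (w : List (String × String)) : String :=
  PySem.Str.lower ((PySem.Dict.get? (PySem.Dict.mk w) "text").getD "")

-- " ".join(texts[i:i+L])
def pvWindow (texts : List String) (i L : Nat) : String :=
  PySem.Str.join " " (PySem.List.slice texts (some (i : Int)) (some ((i : Int) + (L : Int))))

-- len(header.split())
def pvSplitLen (h : String) : Nat := (PySem.Str.split₀ h).length

-- A's inner 'for i in range(lo, stop): if window == header: …; break' = first match index
def pvFirstHit (texts : List String) (h : String) (L i stop : Nat) : Option Nat :=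
  if hlt : i < stop then
    if pvWindow texts i L == h then some i
    else pvFirstHit texts h L (i + 1) stop
  else none
termination_by stop - i
decreasing_by omega

def pvStartA (texts : List String) : Nat :=
  pvStartHeaders.foldl (fun acc h =>
    match pvFirstHit texts h (pvSplitLen h) 0 (texts.length + 1 - pvSplitLen h) with
    | some i => if acc < i then i else acc
    | none => acc) 0

def pvCutA (texts : List String) (start dflt : Nat) : Nat :=
  pvNonTxnHeaders.foldl (fun acc h =>
    match pvFirstHit texts h (pvSplitLen h) start (texts.length + 1 - pvSplitLen h) with
    | some i => if i < acc then i else acc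
    | none => acc) dflt

def filter_non_txn_sections_py (words : List (List (String × String))) : List (List (String × String)) :=
  if words.isEmpty then words
  else
    let texts := words.map pvText
    let start0 := pvStartA texts
    let start := if start0 < 20 then 0 else start0
    let cutoff := pvCutA texts start words.length
    PySem.List.slice words (some (start : Int)) (some (cutoff : Int))

-- ===== PORT B =====
-- hit(i, h, hlen) = i + hlen <= n and " ".join(texts[i:i+hlen]) == h
def pvHit (texts : List String) (i : Nat) (p : String × Nat) : Bool :=
  decide (i + p.2 ≤ texts.length) && (pvWindow texts i p.2 == p.1)

-- [(h, len(h.split())) for h in headers]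
def pvPairs (l : List String) : List (String × Nat) := l.map (fun h => (h, pvSplitLen h))

-- B's while loop: retire headers at their first occurrence, remember the last retirement position
def pvStartScan (texts : List String) (pending : List (String × Nat)) (best i : Nat) : Nat :=
  if h : i < texts.length ∧ pending ≠ [] then
    let rest := pending.filter (fun p => !pvHit texts i p)
    pvStartScan texts rest (if rest.length ≠ pending.length then i else best) (i + 1)
  else best
termination_by texts.length - i
decreasing_by omega

-- B's cutoff loop: first position ≥ i where any non-txn header matches, else n
def pvCutScan (texts : List String) (pairs : List (String × Nat)) (i : Nat) : Nat :=
  if h : i < texts.length then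
    if pairs.any (pvHit texts i) then i else pvCutScan texts pairs (i + 1)
  else texts.length
termination_by texts.length - i
decreasing_by omega

def filter_non_txn_sections_py_alt (words : List (List (String × String))) : List (List (String × String)) :=
  if words.isEmpty then words
  else
    let texts := words.map pvText
    let start0 := pvStartScan texts (pvPairs pvStartHeaders) 0 0
    let start := if start0 < 20 then 0 else start0
    let cutoff := pvCutScan texts (pvPairs pvNonTxnHeaders) start
    PySem.List.slice words (some (start : Int)) (some (cutoff : Int))

-- ===== PRECONDITION & SPEC =====
-- Pre_ excludes word dicts without a "text" key: A raises KeyError there (so does B).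
def Pre_filter_non_txn_sections_py (words : List (List (String × String))) : Prop :=
  ∀ w ∈ words, (PySem.Dict.get? (PySem.Dict.mk w) "text").isSome = true
instance (words : List (List (String × String))) : Decidable (Pre_filter_non_txn_sections_py words) := by
  unfold Pre_filter_non_txn_sections_py; infer_instance

def pvWitness_filter_non_txn_sections_py : (List (List (String × String))) :=
  ([[("text", "transaction"), ("top", "10")], [("text", "detail")], [("text", "3.50")]])

def Spec_filter_non_txn_sections_py (words : List (List (String × String))) (out : List (List (String × String))) : Prop := out = filter_non_txn_sections_py_alt words
instance (words : List (List (String × String))) (out : List (List (String × String))) : Decidable (Spec_filter_non_txn_sections_py words out) := by unfold Spec_filter_non_txn_sections_py; infer_instance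

-- ===== CLAIM (what is proved, stated in full; the proofs are below) =====
def Claim_equal_filter_non_txn_sections_py : Prop := ∀ (words : List (List (String × String))), Dom_filter_non_txn_sections_py words → Pre_filter_non_txn_sections_py words → Spec_filter_non_txn_sections_py words (filter_non_txn_sections_py words)

-- ===== LEMMAS AND PROOFS =====

-- abbreviation used throughout: first occurrence of header p.1 (token length p.2) at index ≥ i
def pvF (texts : List String) (i : Nat) (p : String × Nat) : Option Nat :=
  pvFirstHit texts p.1 p.2 i (texts.length + 1 - p.2)

def pvVF (texts : List String) (i : Nat) (p : String × Nat) : Nat := (pvF texts i p).getD 0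

def pvLmax (v : (String × Nat) → Nat) (l : List (String × Nat)) : Nat :=
  l.foldl (fun a x => max a (v x)) 0

lemma pvFirstHit_none (texts : List String) (h : String) (L i stop : Nat) (hge : stop ≤ i) :
    pvFirstHit texts h L i stop = none := by
  unfold pvFirstHit; rw [dif_neg (by omega)]

lemma pvFirstHit_ge (texts : List String) (h : String) (L i stop j : Nat)
    (hj : pvFirstHit texts h L i stop = some j) : i ≤ j := by
  fun_induction pvFirstHit texts h L i stop with
  | case1 a b c => simp_all
  | case2 a b c ih => have := ih hj; omega
  | case3 a b => simp at hj

lemma pvFirstHit_lt_stop (texts : List String) (h : String) (L i stop j : Nat)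
    (hj : pvFirstHit texts h L i stop = some j) : j < stop := by
  fun_induction pvFirstHit texts h L i stop with
  | case1 a b c => simp_all
  | case2 a b c ih => exact ih hj
  | case3 a b => simp at hj

lemma pvHit_firstHit_true (texts : List String) (i : Nat) (p : String × Nat)
    (ht : pvHit texts i p = true) : pvF texts i p = some i := by
  unfold pvHit at ht
  simp only [Bool.and_eq_true, decide_eq_true_eq, beq_iff_eq] at ht
  unfold pvF pvFirstHit
  rw [dif_pos (by omega)]
  simp [ht.2]

lemma pvHit_firstHit_false (texts : List String) (i : Nat) (p : String × Nat)
    (hf : pvHit texts i p = false) : pvF texts i p = pvF texts (i + 1) p := by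
  unfold pvHit at hf
  by_cases hle : i + p.2 <= texts.length
  · simp only [Bool.and_eq_false_iff, decide_eq_false_iff_not, beq_eq_false_iff_ne] at hf
    rcases hf with h1 | h2
    · omega
    · unfold pvF
      conv_lhs => rw [pvFirstHit]
      rw [dif_pos (by omega)]
      simp [h2]
  · unfold pvF
    rw [pvFirstHit_none _ _ _ _ _ (by omega), pvFirstHit_none _ _ _ _ _ (by omega)]

lemma pvFoldl_max_shift (v : (String × Nat) → Nat) (l : List (String × Nat)) (b : Nat) :
    l.foldl (fun a x => max a (v x)) b = max b (pvLmax v l) := by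
  induction l generalizing b with
  | nil => simp [pvLmax]
  | cons x xs ih =>
      have h1 : List.foldl (fun a x => max a (v x)) b (x :: xs)
          = max (max b (v x)) (pvLmax v xs) := by rw [List.foldl_cons, ih]
      have h2 : pvLmax v (x :: xs) = max (max 0 (v x)) (pvLmax v xs) := by
        show List.foldl (fun a x => max a (v x)) 0 (x :: xs) = _
        rw [List.foldl_cons, ih]
      rw [h1, h2]; omega

lemma pvLmax_cons (v : (String × Nat) → Nat) (x : String × Nat) (l : List (String × Nat)) :
    pvLmax v (x :: l) = max (v x) (pvLmax v l) := by
  show List.foldl (fun a x => max a (v x)) 0 (x :: l) = _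
  rw [List.foldl_cons, pvFoldl_max_shift]
  omega

lemma pvLmax_zero (v : (String × Nat) → Nat) (l : List (String × Nat))
    (hz : ∀ p ∈ l, v p = 0) : pvLmax v l = 0 := by
  induction l with
  | nil => simp [pvLmax]
  | cons x xs ih =>
      rw [pvLmax_cons, hz x (by simp), ih (fun p hp => hz p (by simp [hp]))]
      omega

lemma pvFilterLen_ne_iff (l : List (String × Nat)) (f : (String × Nat) → Bool) :
    ((l.filter (fun p => !f p)).length ≠ l.length) ↔ l.any f = true := by
  induction l with
  | nil => simp
  | cons x xs ih =>
      by_cases hx : f x = true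
      · have hlen := List.length_filter_le (fun p => !f p) xs
        simp [hx]
        omega
      · simp only [List.filter_cons, hx, Bool.not_false, if_pos, List.any_cons, Bool.false_or,
          List.length_cons]
        rw [← ih]
        omega

-- one position step of the start scan, seen on the header side
lemma pvPosStep (texts : List String) (i : Nat)
    (l : List (String × Nat)) (hL : ∀ p ∈ l, 1 ≤ p.2) :
    max (if l.any (pvHit texts i) then i else 0)
        (pvLmax (pvVF texts (i + 1)) (l.filter (fun p => !pvHit texts i p)))
      = pvLmax (pvVF texts i) l := by
  induction l with
  | nil => simp [pvLmax]
  | cons q ps ih =>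
      have ihp := ih (fun p hp => hL p (by simp [hp]))
      cases hq : pvHit texts i q with
      | true =>
          have hvq : pvVF texts i q = i := by
            simp [pvVF, pvHit_firstHit_true texts i q hq]
          simp only [List.filter_cons, hq, Bool.not_true, Bool.false_eq_true, if_false,
            List.any_cons, Bool.true_or]
          rw [pvLmax_cons, hvq]
          cases hany : ps.any (pvHit texts i) <;>
            simp only [hany, Bool.false_eq_true, if_false, if_true] at ihp ⊢ <;> omega
      | false =>
          have hvq : pvVF texts i q = pvVF texts (i + 1) q := by
            simp [pvVF, pvHit_firstHit_false texts i q hq]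
          simp only [List.filter_cons, hq, Bool.not_false, if_true, List.any_cons,
            Bool.false_or]
          rw [pvLmax_cons, pvLmax_cons, hvq]
          cases hany : ps.any (pvHit texts i) <;> simp only [hany, Bool.false_eq_true,
            if_false, if_true] at ihp ⊢ <;> omega

lemma pvStartScan_eq_aux (texts : List String) : ∀ (fuel i : Nat)
    (pending : List (String × Nat)) (best : Nat), (∀ p ∈ pending, 1 ≤ p.2) → best ≤ i →
    texts.length ≤ i + fuel →
    pvStartScan texts pending best i = max best (pvLmax (pvVF texts i) pending) := by
  intro fuel
  induction fuel with
  | zero =>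
      intro i pending best hL hb hfuel
      rw [pvStartScan, dif_neg (by rintro ⟨h1, -⟩; omega)]
      have hz : ∀ p ∈ pending, pvVF texts i p = 0 := by
        intro p hp
        have h2 := hL p hp
        have hnone : pvF texts i p = none :=
          pvFirstHit_none texts p.1 p.2 i (texts.length + 1 - p.2) (by omega)
        simp [pvVF, hnone]
      rw [pvLmax_zero _ _ hz]
      omega
  | succ f ihf =>
      intro i pending best hL hb hfuel
      by_cases hcond : i < texts.length ∧ pending ≠ []
      · rw [pvStartScan, dif_pos hcond]
        obtain ⟨hi, -⟩ := hcond
        dsimp only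
        have hLr : ∀ p ∈ pending.filter (fun p => !pvHit texts i p), 1 ≤ p.2 :=
          fun p hp => hL p (List.mem_of_mem_filter hp)
        have hposs := pvPosStep texts i pending hL
        by_cases hany : pending.any (pvHit texts i) = true
        · have hcc := (pvFilterLen_ne_iff pending (pvHit texts i)).mpr hany
          rw [if_pos hcc, ihf (i + 1) _ i hLr (by omega) (by omega)]
          simp only [hany, if_true] at hposs
          omega
        · have hanyf : pending.any (pvHit texts i) = false := by simpa using hany
          have hcc : ¬((pending.filter (fun p => !pvHit texts i p)).length ≠ pending.length) :=
            fun hcc => hany ((pvFilterLen_ne_iff pending (pvHit texts i)).mp hcc)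
          rw [if_neg hcc, ihf (i + 1) _ best hLr (by omega) (by omega)]
          simp only [hanyf, Bool.false_eq_true, if_false] at hposs
          omega
      · rw [pvStartScan, dif_neg hcond]
        rcases Decidable.not_and_iff_not_or_not.mp hcond with hi | hne
        · have hz : ∀ p ∈ pending, pvVF texts i p = 0 := by
            intro p hp
            have h2 := hL p hp
            have hnone : pvF texts i p = none :=
              pvFirstHit_none texts p.1 p.2 i (texts.length + 1 - p.2) (by omega)
            simp [pvVF, hnone]
          rw [pvLmax_zero _ _ hz]
          omega
        · have : pending = [] := by simpa using hne
          subst this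
          simp [pvLmax]

lemma pvStartScan_eq (texts : List String) (pending : List (String × Nat)) (best i : Nat)
    (hL : ∀ p ∈ pending, 1 ≤ p.2) (hb : best ≤ i) :
    pvStartScan texts pending best i = max best (pvLmax (pvVF texts i) pending) :=
  pvStartScan_eq_aux texts texts.length i pending best hL hb (by omega)

lemma pvStartA_eq_scan (texts : List String) :
    pvStartA texts = pvStartScan texts (pvPairs pvStartHeaders) 0 0 := by
  rw [pvStartScan_eq texts _ 0 0 (by decide) (le_refl 0)]
  have hstep : (fun (acc : Nat) (h : String) =>
      match pvFirstHit texts h (pvSplitLen h) 0 (texts.length + 1 - pvSplitLen h) with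
      | some i => if acc < i then i else acc
      | none => acc)
      = fun (acc : Nat) (h : String) => max acc (pvVF texts 0 (h, pvSplitLen h)) := by
    funext acc h
    cases hF : pvFirstHit texts h (pvSplitLen h) 0 (texts.length + 1 - pvSplitLen h) with
    | none => simp [pvVF, pvF, hF]
    | some j =>
        simp [pvVF, pvF, hF]
        split_ifs <;> omega
  unfold pvStartA pvLmax pvPairs
  rw [List.foldl_map, hstep]
  omega

-- min-fold helpers for the cutoff side
lemma pvFoldl_min_congr (v w : (String × Nat) → Option Nat) (n : Nat) (l : List (String × Nat)) (b : Nat)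
    (hc : ∀ p ∈ l, v p = w p) :
    l.foldl (fun a p => min a ((v p).getD n)) b = l.foldl (fun a p => min a ((w p).getD n)) b := by
  induction l generalizing b with
  | nil => rfl
  | cons q ps ih =>
      rw [List.foldl_cons, List.foldl_cons, hc q (by simp)]
      exact ih _ (fun p hp => hc p (by simp [hp]))

lemma pvFoldl_min_const (v : (String × Nat) → Option Nat) (n : Nat) (l : List (String × Nat)) (b : Nat)
    (hall : ∀ p ∈ l, b ≤ (v p).getD n) :
    l.foldl (fun a p => min a ((v p).getD n)) b = b := by
  induction l generalizing b with
  | nil => rfl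
  | cons q ps ih =>
      rw [List.foldl_cons, Nat.min_eq_left (hall q (by simp))]
      exact ih b (fun p hp => hall p (by simp [hp]))

lemma pvFoldl_min_exists (v : (String × Nat) → Option Nat) (n i : Nat) (l : List (String × Nat)) (b : Nat)
    (hb : i ≤ b) (hall : ∀ p ∈ l, i ≤ (v p).getD n) (hex : ∃ p ∈ l, (v p).getD n = i) :
    l.foldl (fun a p => min a ((v p).getD n)) b = i := by
  induction l generalizing b with
  | nil => simp at hex
  | cons q ps ih =>
      rw [List.foldl_cons]
      have hbq : i ≤ min b ((v q).getD n) := le_min hb (hall q (by simp))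
      rcases hex with ⟨p, hp, hpi⟩
      rcases List.mem_cons.mp hp with rfl | hps
      · rw [hpi, Nat.min_eq_right hb]
        exact pvFoldl_min_const v n ps i (fun p hp => hall p (by simp [hp]))
      · exact ih _ hbq (fun p hp => hall p (by simp [hp])) ⟨p, hps, hpi⟩

lemma pvCutScan_eq (texts : List String) (pairs : List (String × Nat)) (i : Nat) :
    (∀ p ∈ pairs, 1 ≤ p.2) →
    pvCutScan texts pairs i
      = pairs.foldl (fun a p => min a ((pvF texts i p).getD texts.length)) texts.length := by
  fun_induction pvCutScan texts pairs i with
  | case1 i hi hany =>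
      intro hL
      refine (pvFoldl_min_exists (pvF texts i) texts.length i pairs texts.length (by omega)
        ?_ ?_).symm
      · intro p hp
        cases hF : pvF texts i p with
        | none => simp; omega
        | some j =>
            have hge : i ≤ j :=
              pvFirstHit_ge texts p.1 p.2 i (texts.length + 1 - p.2) j hF
            simpa using hge
      · obtain ⟨p, hp, hhit⟩ := List.any_eq_true.mp hany
        exact ⟨p, hp, by simp [pvHit_firstHit_true texts i p hhit]⟩
  | case2 i hi hany ih =>
      intro hL
      rw [ih hL]
      refine pvFoldl_min_congr (pvF texts (i + 1)) (pvF texts i) texts.length pairs texts.length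
        (fun p hp => ?_)
      have hf : pvHit texts i p = false := by
        cases hv : pvHit texts i p
        · rfl
        · exact absurd (List.any_eq_true.mpr ⟨p, hp, hv⟩) hany
      exact (pvHit_firstHit_false texts i p hf).symm
  | case3 i hi =>
      intro hL
      refine (pvFoldl_min_const (pvF texts i) texts.length pairs texts.length ?_).symm
      intro p hp
      have h2 := hL p hp
      have hnone : pvF texts i p = none :=
        pvFirstHit_none texts p.1 p.2 i (texts.length + 1 - p.2) (by omega)
      simp [hnone]

lemma pvFoldl_matchmin (texts : List String) (start : Nat) (l : List String) (b : Nat)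
    (hb : b ≤ texts.length) :
    l.foldl (fun acc h =>
        match pvFirstHit texts h (pvSplitLen h) start (texts.length + 1 - pvSplitLen h) with
        | some i => if i < acc then i else acc
        | none => acc) b
      = l.foldl (fun a h => min a ((pvF texts start (h, pvSplitLen h)).getD texts.length)) b := by
  induction l generalizing b with
  | nil => rfl
  | cons x xs ih =>
      rw [List.foldl_cons, List.foldl_cons]
      cases hF : pvFirstHit texts x (pvSplitLen x) start (texts.length + 1 - pvSplitLen x) with
      | none =>
          have hpv : pvF texts start (x, pvSplitLen x) = none := hF
          simp only [hpv, Option.getD_none, Nat.min_eq_left hb]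
          exact ih b hb
      | some j =>
          have hjs : j < texts.length + 1 - pvSplitLen x :=
            pvFirstHit_lt_stop texts x (pvSplitLen x) start (texts.length + 1 - pvSplitLen x) j hF
          have hpv : pvF texts start (x, pvSplitLen x) = some j := hF
          have h1 : (if j < b then j else b)
              = min b ((pvF texts start (x, pvSplitLen x)).getD texts.length) := by
            rw [hpv, Option.getD_some, Nat.min_def]
            split_ifs <;> omega
          simp only [hpv, Option.getD_some, h1]
          exact ih (min b j) (by omega)

lemma pvCutA_eq_scan (texts : List String) (start : Nat) :
    pvCutA texts start texts.length = pvCutScan texts (pvPairs pvNonTxnHeaders) start := by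
  unfold pvCutA
  rw [pvFoldl_matchmin texts start pvNonTxnHeaders texts.length le_rfl,
    pvCutScan_eq texts _ start (by decide)]
  unfold pvPairs
  rw [List.foldl_map]

-- ===== VERDICT (by name: the statement is the Claim_ definition above) =====
theorem filter_non_txn_sections_py_spec : Claim_equal_filter_non_txn_sections_py := by
  intro words _hdom _hpre
  unfold Spec_filter_non_txn_sections_py
  unfold filter_non_txn_sections_py filter_non_txn_sections_py_alt
  by_cases hw : words.isEmpty
  · simp [hw]
  · simp only [hw, Bool.false_eq_true, if_false]
    rw [← pvStartA_eq_scan]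
    have hlen : (words.map pvText).length = words.length := List.length_map _
    rw [← pvCutA_eq_scan, hlen]
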